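-- pv_equiv track=rewrite | github.com/jowagner/mtb-tri-training | scripts/error-analysis.py | get_eval_keys_subsets
-- ===== SOURCE A (Python) =====
-- def get_eval_keys_subsets(eval_keys):
--     subsets = {}
--     for key in eval_keys:
--         if key == 'any':
--             continue
--         if key.startswith('ID:'):
--             skey = 'by-sentence'
--         elif key.startswith('T:'):
--             skey = 'token-rows'
--         elif key.startswith('R:'):
--             skey = 'gold-relation'
--         elif key.startswith('A:'):
--             skey = 'any-prediction'
--         elif key.startswith('M:'):
--             skey = 'majority-predictions'
--         elif key.startswith('S:'):
--             skey = 'sentence-level'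
--         elif key.startswith('SL:12-12'):
--             skey = 'length-12'
--         elif key.startswith('SL:'):
--             skey = 'by-length'
--         else:
--             skey = 'other'
--         if skey not in subsets:
--             subsets[skey] = set()
--         subsets[skey].add(key)
--     for skey in subsets:
--         subsets[skey].add('any')
--     return subsets.items()
-- ===== SOURCE B (Python) =====
-- # B: table-driven classification + group-by comprehension instead of an inline
-- # if/elif chain feeding an incrementally mutated dict-of-sets (objective: idiomatic).
-- PREFIX_TABLE = (
--     ('ID:', 'by-sentence'),
--     ('T:', 'token-rows'),
--     ('R:', 'gold-relation'),
--     ('A:', 'any-prediction'),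
--     ('M:', 'majority-predictions'),
--     ('S:', 'sentence-level'),
--     ('SL:12-12', 'length-12'),
--     ('SL:', 'by-length'),
-- )
--
-- def _label(key):
--     for prefix, label in PREFIX_TABLE:
--         if key.startswith(prefix):
--             return label
--     return 'other'
--
-- def get_eval_keys_subsets(eval_keys):
--     keys = [k for k in eval_keys if k != 'any']
--     labels = []
--     for k in keys:
--         lab = _label(k)
--         if lab not in labels:
--             labels.append(lab)
--     return {lab: {k for k in keys if _label(k) == lab} | {'any'}
--             for lab in labels}.items()
-- ===== Notes on version B (the rewrite author's own statement) =====
-- stated objective: idiomatic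
-- what changed: Replaces the inline if/elif prefix chain and the incrementally mutated dict-of-sets with an ordered prefix table looked up by first match, a first-occurrence label list, and one group-by dict comprehension that builds each subset (plus 'any') in a single expression.
import Mathlib
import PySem

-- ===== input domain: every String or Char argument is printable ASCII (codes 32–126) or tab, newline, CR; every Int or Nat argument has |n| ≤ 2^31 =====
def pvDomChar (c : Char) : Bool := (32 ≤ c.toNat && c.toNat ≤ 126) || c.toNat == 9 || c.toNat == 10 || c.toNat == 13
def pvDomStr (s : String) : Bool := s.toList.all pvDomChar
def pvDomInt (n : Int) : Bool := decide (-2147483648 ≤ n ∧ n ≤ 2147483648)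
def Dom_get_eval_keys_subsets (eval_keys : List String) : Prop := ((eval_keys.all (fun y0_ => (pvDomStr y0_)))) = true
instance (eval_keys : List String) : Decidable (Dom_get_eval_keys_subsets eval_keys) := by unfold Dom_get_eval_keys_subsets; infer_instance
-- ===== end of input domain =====

-- B groups keys by a table-driven prefix label instead of A's if/elif chain feeding a mutated dict-of-sets (objective: idiomatic).

-- ===== PORT A =====
def get_eval_keys_subsets (eval_keys : List String) : List (String × List String) :=
  let subsets : PySem.Dict String (PySem.Set String) :=
    eval_keys.foldl (fun subsets key =>
      if key == "any" then subsets
      else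
        let skey :=
          if PySem.Str.startswith key "ID:" then "by-sentence"
          else if PySem.Str.startswith key "T:" then "token-rows"
          else if PySem.Str.startswith key "R:" then "gold-relation"
          else if PySem.Str.startswith key "A:" then "any-prediction"
          else if PySem.Str.startswith key "M:" then "majority-predictions"
          else if PySem.Str.startswith key "S:" then "sentence-level"
          else if PySem.Str.startswith key "SL:12-12" then "length-12"
          else if PySem.Str.startswith key "SL:" then "by-length"
          else "other"
        subsets.modify skey PySem.Set.empty (fun s => PySem.Set.add s key)) PySem.Dict.empty
  let subsets :=
    subsets.keys.foldl (fun d skey => d.modify skey PySem.Set.empty (fun s => PySem.Set.add s "any")) subsets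
  subsets.items

-- ===== PORT B =====
def pvPrefixTable : List (String × String) :=
  [("ID:", "by-sentence"), ("T:", "token-rows"), ("R:", "gold-relation"),
   ("A:", "any-prediction"), ("M:", "majority-predictions"), ("S:", "sentence-level"),
   ("SL:12-12", "length-12"), ("SL:", "by-length")]

-- first prefix of the table that matches, else "other" (Source B's _label loop)
def pvLabel (key : String) : String :=
  match pvPrefixTable.find? (fun p => PySem.Str.startswith key p.1) with
  | some p => p.2
  | none => "other"

def get_eval_keys_subsets_alt (eval_keys : List String) : List (String × List String) :=
  let keys := eval_keys.filter (fun k => k != "any")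
  let labels := keys.foldl (fun ls k => PySem.Set.add ls (pvLabel k)) []
  labels.map (fun lab =>
    (lab, PySem.Set.union (PySem.Set.ofList (keys.filter (fun k => pvLabel k == lab))) ["any"]))

-- ===== PRECONDITION & SPEC =====
def Spec_get_eval_keys_subsets (eval_keys : List String) (out : List (String × List String)) : Prop := out = get_eval_keys_subsets_alt eval_keys
instance (eval_keys : List String) (out : List (String × List String)) : Decidable (Spec_get_eval_keys_subsets eval_keys out) := by unfold Spec_get_eval_keys_subsets; infer_instance

-- ===== CLAIM (what is proved, stated in full; the proofs are below) =====
def Claim_equal_get_eval_keys_subsets : Prop := ∀ (eval_keys : List String), Dom_get_eval_keys_subsets eval_keys → Spec_get_eval_keys_subsets eval_keys (get_eval_keys_subsets eval_keys)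

-- ===== LEMMAS AND PROOFS =====

-- A's if/elif chain computes the first-match table lookup
theorem pvChain_eq_label (key : String) :
    (if PySem.Str.startswith key "ID:" then "by-sentence"
     else if PySem.Str.startswith key "T:" then "token-rows"
     else if PySem.Str.startswith key "R:" then "gold-relation"
     else if PySem.Str.startswith key "A:" then "any-prediction"
     else if PySem.Str.startswith key "M:" then "majority-predictions"
     else if PySem.Str.startswith key "S:" then "sentence-level"
     else if PySem.Str.startswith key "SL:12-12" then "length-12"
     else if PySem.Str.startswith key "SL:" then "by-length"
     else "other") = pvLabel key := by
  unfold pvLabel pvPrefixTable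
  simp only [List.find?]
  repeat' split <;> simp_all

-- value of the grouping fold at any label
theorem pvGetD_group (L : String → String) (ks : List String)
    (d : PySem.Dict String (PySem.Set String)) (lab : String) :
    (ks.foldl (fun d k => d.modify (L k) PySem.Set.empty (fun s => PySem.Set.add s k)) d).getD lab PySem.Set.empty
      = PySem.Set.update (d.getD lab PySem.Set.empty) (ks.filter (fun k => L k == lab)) := by
  induction ks generalizing d with
  | nil => simp [PySem.Set.update]
  | cons k ks ih =>
      simp only [List.foldl_cons, ih, List.filter_cons]
      by_cases h : L k = lab
      · simp [h, PySem.Set.update]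
      · simp [h, PySem.Dict.getD_modify, Ne.symm h]

-- value of the 'add any' fold at any label
theorem pvGetD_addany (ks : List String) (d : PySem.Dict String (PySem.Set String)) (lab : String) :
    (ks.foldl (fun d k => d.modify k PySem.Set.empty (fun s => PySem.Set.add s "any")) d).getD lab PySem.Set.empty
      = if lab ∈ ks then PySem.Set.add (d.getD lab PySem.Set.empty) "any" else d.getD lab PySem.Set.empty := by
  induction ks generalizing d with
  | nil => simp
  | cons k ks ih =>
      simp only [List.foldl_cons, ih, PySem.Dict.getD_modify, List.mem_cons]
      by_cases h : lab = k
      · subst h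
        by_cases hm : lab ∈ ks <;> simp [hm]
      · simp [h]

theorem pvUpdate_self (s : PySem.Set String) : PySem.Set.update s s = s := by
  rw [PySem.Set.update_eq_append_filter]
  have h : List.filter (fun y => !s.contains y) (PySem.Set.ofList s) = [] :=
    List.filter_eq_nil_iff.mpr (fun y hy => by
      simp [(PySem.Set.mem_ofList s y).mp hy])
  rw [h, List.append_nil]

-- ===== VERDICT (by name: the statement is the Claim_ definition above) =====
theorem get_eval_keys_subsets_spec : Claim_equal_get_eval_keys_subsets := by
  intro eval_keys _
  show get_eval_keys_subsets eval_keys = get_eval_keys_subsets_alt eval_keys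
  unfold get_eval_keys_subsets get_eval_keys_subsets_alt
  simp only []
  set keys := eval_keys.filter (fun k => k != "any") with hkeys
  have hfun : (fun (subsets : PySem.Dict String (PySem.Set String)) key =>
      if key == "any" then subsets
      else
        let skey :=
          if PySem.Str.startswith key "ID:" then "by-sentence"
          else if PySem.Str.startswith key "T:" then "token-rows"
          else if PySem.Str.startswith key "R:" then "gold-relation"
          else if PySem.Str.startswith key "A:" then "any-prediction"
          else if PySem.Str.startswith key "M:" then "majority-predictions"
          else if PySem.Str.startswith key "S:" then "sentence-level"
          else if PySem.Str.startswith key "SL:12-12" then "length-12"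
          else if PySem.Str.startswith key "SL:" then "by-length"
          else "other"
        subsets.modify skey PySem.Set.empty (fun s => PySem.Set.add s key))
      = (fun d k => if (k != "any") = true then d.modify (pvLabel k) PySem.Set.empty (fun s => PySem.Set.add s k) else d) := by
    funext d k
    simp only [pvChain_eq_label]
    cases h : (k == "any") <;> simp at h <;> simp [h]
  rw [hfun, ← List.foldl_filter, ← hkeys]
  set d1 := keys.foldl (fun d k => d.modify (pvLabel k) PySem.Set.empty (fun s => PySem.Set.add s k)) PySem.Dict.empty with hd1
  set d2 := d1.keys.foldl (fun d skey => d.modify skey PySem.Set.empty (fun s => PySem.Set.add s "any")) d1 with hd2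
  have hk1 : d1.keys = PySem.Set.ofList (keys.map pvLabel) := by
    rw [hd1, PySem.Dict.keys_foldl_modify_key keys pvLabel PySem.Set.empty (fun _ k => fun s => PySem.Set.add s k),
        PySem.Dict.keys_empty, PySem.Set.update_nil_left]
  have hk2 : d2.keys = d1.keys := by
    rw [hd2, PySem.Dict.keys_foldl_modify d1.keys PySem.Set.empty (fun _ _ => fun s => PySem.Set.add s "any"),
        pvUpdate_self]
  have hnd : d2.keys.Nodup := by rw [hk2, hk1]; exact PySem.Set.nodup_ofList _
  have hlabels : keys.foldl (fun ls k => PySem.Set.add ls (pvLabel k)) [] = PySem.Set.ofList (keys.map pvLabel) := by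
    rw [← PySem.Set.update_map_eq_foldl_add, PySem.Set.update_nil_left]
  rw [PySem.Dict.items_eq_map_keys d2 hnd PySem.Set.empty, hk2, hk1, hlabels]
  apply List.map_congr_left
  intro lab hlab
  have hmem : lab ∈ d1.keys := by rw [hk1]; exact hlab
  have h2 : d2.getD lab PySem.Set.empty = PySem.Set.add (d1.getD lab PySem.Set.empty) "any" := by
    rw [hd2, pvGetD_addany, if_pos hmem]
  have h1 : d1.getD lab PySem.Set.empty = PySem.Set.ofList (keys.filter (fun k => pvLabel k == lab)) := by
    rw [hd1, pvGetD_group, PySem.Dict.getD_empty, PySem.Set.update_empty]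
  rw [h2, h1]
  simp [PySem.Set.union, PySem.Set.update]
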